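-- pv_equiv track=rewrite | github.com/abigfatstone/feetfit | utils/logger_dev.py | _format_multiline_message
-- ===== SOURCE A (Python) =====
-- def _format_multiline_message(msg: str, current_time: str, function_name: str, level: str, indent: str) -> str:
--     """
--     格式化多行消息，确保每行都有正确的时间戳、function名和缩进
--
--     Args:
--         msg: 原始消息（可能包含换行符）
--         current_time: 当前时间字符串
--         function_name: 格式化后的函数名
--         level: 日志级别
--         indent: 缩进字符串
--
--     Returns:
--         str: 格式化后的完整消息
--     """
--     lines = msg.split("\n")
--     if len(lines) <= 1:
--         return f"[{current_time}][{function_name}][{level}]:{indent}{msg}"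
--
--     formatted_lines = []
--     # 第一行正常格式
--     formatted_lines.append(f"[{current_time}][{function_name}][{level}]:{indent}{lines[0]}")
--
--     # 后续行需要对齐
--     prefix_length = len(f"[{current_time}][{function_name}][{level}]:")
--     padding = " " * prefix_length
--
--     for line in lines[1:]:
--         formatted_lines.append(f"{padding}{indent}{line}")
--
--     return "\n".join(formatted_lines)
-- ===== SOURCE B (Python) =====
-- def _format_multiline_message(msg: str, current_time: str, function_name: str, level: str, indent: str) -> str:
--     prefix = f"[{current_time}][{function_name}][{level}]:"
--     padding = " " * len(prefix)
--     return prefix + indent + msg.replace("\n", "\n" + padding + indent)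
-- ===== Notes on version B (the rewrite author's own statement) =====
-- stated objective: simpler
-- what changed: Replaces the split/branch/loop/join pipeline with computing the prefix and its padding once and a single msg.replace('\n', '\n'+padding+indent), no splitting and no loop.
import Mathlib
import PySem

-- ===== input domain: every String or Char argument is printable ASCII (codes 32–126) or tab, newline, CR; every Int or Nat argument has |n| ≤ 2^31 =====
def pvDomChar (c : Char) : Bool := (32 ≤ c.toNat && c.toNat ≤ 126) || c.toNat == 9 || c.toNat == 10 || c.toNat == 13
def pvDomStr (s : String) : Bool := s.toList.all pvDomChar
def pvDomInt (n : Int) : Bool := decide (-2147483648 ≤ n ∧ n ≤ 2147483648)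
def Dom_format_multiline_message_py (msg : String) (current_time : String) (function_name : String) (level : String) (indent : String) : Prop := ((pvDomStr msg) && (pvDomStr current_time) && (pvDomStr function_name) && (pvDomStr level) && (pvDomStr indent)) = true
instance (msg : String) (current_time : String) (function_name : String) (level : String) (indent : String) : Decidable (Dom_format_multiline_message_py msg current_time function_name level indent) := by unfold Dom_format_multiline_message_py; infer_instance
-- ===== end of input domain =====

-- B replaces A's split / branch / per-line loop / join with one prefix computation and a single
-- msg.replace("\n", "\n" + padding + indent) — simpler, same observable result.

-- ===== PORT A =====
def format_multiline_message_py (msg : String) (current_time : String) (function_name : String) (level : String) (indent : String) : String :=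
  let lines := PySem.Chars.splitOn msg.toList ['\n']
  if lines.length ≤ 1 then
    String.ofList ('[' :: current_time.toList ++ ']' :: '[' :: function_name.toList ++ ']' :: '[' :: level.toList ++ ']' :: ':' :: (indent.toList ++ msg.toList))
  else
    let firstLine := '[' :: current_time.toList ++ ']' :: '[' :: function_name.toList ++ ']' :: '[' :: level.toList ++ ']' :: ':' :: (indent.toList ++ lines.headI)
    let prefixLength := PySem.Chars.len ('[' :: current_time.toList ++ ']' :: '[' :: function_name.toList ++ ']' :: '[' :: level.toList ++ [']', ':'])
    -- " " * prefix_length: prefixLength is a Python int (≥ 0 here), .toNat is exact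
    let padding := List.replicate prefixLength.toNat ' '
    let formattedLines := lines.tail.foldl (fun acc line => acc ++ [padding ++ indent.toList ++ line]) [firstLine]
    String.ofList (PySem.Chars.join ['\n'] formattedLines)

-- ===== PORT B =====
def format_multiline_message_py_alt (msg : String) (current_time : String) (function_name : String) (level : String) (indent : String) : String :=
  let prefixChars := '[' :: current_time.toList ++ ']' :: '[' :: function_name.toList ++ ']' :: '[' :: level.toList ++ [']', ':']
  -- " " * len(prefix): the length is ≥ 0, .toNat is exact
  let padding := List.replicate (PySem.Chars.len prefixChars).toNat ' '
  String.ofList (prefixChars ++ indent.toList ++ PySem.Chars.replace msg.toList ['\n'] ('\n' :: (padding ++ indent.toList)))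

-- ===== PRECONDITION & SPEC =====
def Spec_format_multiline_message_py (msg : String) (current_time : String) (function_name : String) (level : String) (indent : String) (out : String) : Prop := out = format_multiline_message_py_alt msg current_time function_name level indent
instance (msg : String) (current_time : String) (function_name : String) (level : String) (indent : String) (out : String) : Decidable (Spec_format_multiline_message_py msg current_time function_name level indent out) := by unfold Spec_format_multiline_message_py; infer_instance

-- ===== CLAIM (what is proved, stated in full; the proofs are below) =====
def Claim_equal_format_multiline_message_py : Prop := ∀ (msg : String) (current_time : String) (function_name : String) (level : String) (indent : String), Dom_format_multiline_message_py msg current_time function_name level indent → Spec_format_multiline_message_py msg current_time function_name level indent (format_multiline_message_py msg current_time function_name level indent)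

-- ===== LEMMAS AND PROOFS =====

-- replace.go's accumulator is a prefix of the result
theorem repl_go_acc (old new : List Char) : ∀ (f : Nat) (l acc : List Char),
    PySem.Chars.replace.go old new f l acc = acc.reverse ++ PySem.Chars.replace.go old new f l [] := by
  intro f
  induction f with
  | zero => intro l acc; simp [PySem.Chars.replace.go]
  | succ f ih =>
    intro l acc
    cases l with
    | nil => simp [PySem.Chars.replace.go]
    | cons c t =>
      simp only [PySem.Chars.replace.go]
      split
      · rw [ih _ (new.reverse ++ acc), ih _ (new.reverse ++ [])]; simp
      · rw [ih t (c :: acc), ih t [c]]; simp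

-- splitOn.go's outer accumulator is a (reversed) prefix of the result
theorem split_go_acc (sep : List Char) : ∀ (f : Nat) (l cur : List Char) (acc : List (List Char)),
    PySem.Chars.splitOn.go sep f l cur acc = acc.reverse ++ PySem.Chars.splitOn.go sep f l cur [] := by
  intro f
  induction f with
  | zero => intro l cur acc; simp [PySem.Chars.splitOn.go]
  | succ f ih =>
    intro l cur acc
    cases l with
    | nil => simp [PySem.Chars.splitOn.go]
    | cons c t =>
      simp only [PySem.Chars.splitOn.go]
      split
      · rw [ih _ [] (cur.reverse :: acc), ih _ [] [cur.reverse]]; simp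
      · rw [ih t (c :: cur) acc]

-- splitOn.go's current-piece accumulator prepends (reversed) onto the first piece
theorem split_go_cur (sep : List Char) : ∀ (f : Nat) (l cur : List Char),
    PySem.Chars.splitOn.go sep f l cur [] =
      (PySem.Chars.splitOn.go sep f l [] []).modifyHead (cur.reverse ++ ·) := by
  intro f
  induction f with
  | zero => intro l cur; simp [PySem.Chars.splitOn.go]
  | succ f ih =>
    intro l cur
    cases l with
    | nil => simp [PySem.Chars.splitOn.go]
    | cons c t =>
      simp only [PySem.Chars.splitOn.go]
      split
      · rw [split_go_acc sep f _ [] [cur.reverse], split_go_acc sep f _ [] [[].reverse]]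
        simp
      · rw [ih t (c :: cur), ih t [c]]
        cases PySem.Chars.splitOn.go sep f t [] [] with
        | nil => simp
        | cons x xs => simp

-- splitOn.go never returns the empty list of pieces
theorem split_go_ne (sep : List Char) : ∀ (f : Nat) (l : List Char),
    PySem.Chars.splitOn.go sep f l [] [] ≠ [] := by
  intro f
  induction f with
  | zero => intro l; simp [PySem.Chars.splitOn.go]
  | succ f ih =>
    intro l
    cases l with
    | nil => simp [PySem.Chars.splitOn.go]
    | cons c t =>
      simp only [PySem.Chars.splitOn.go]
      split
      · rw [split_go_acc sep f _ [] [[].reverse]]; simp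
      · rw [split_go_cur sep f t [c]]
        have := ih t
        cases hg : PySem.Chars.splitOn.go sep f t [] [] with
        | nil => exact absurd hg this
        | cons x xs => simp

-- intercalate over a cons whose head gained a character
theorem intercalate_cons_head (new x : List Char) (c : Char) (xs : List (List Char)) :
    new.intercalate ((c :: x) :: xs) = c :: new.intercalate (x :: xs) := by
  cases xs with
  | nil => simp [List.intercalate]
  | cons y ys => simp [List.intercalate, List.intersperse]

-- intercalate over a cons with empty head, nonempty tail
theorem intercalate_nil_cons (new : List Char) (x : List Char) (xs : List (List Char)) :
    new.intercalate ([] :: x :: xs) = new ++ new.intercalate (x :: xs) := by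
  simp [List.intercalate, List.intersperse]

-- core: replacing sep by new is intercalating new over the sep-split pieces
theorem repl_go_eq_intercalate (sep new : List Char) (hsep : sep ≠ []) :
    ∀ (n f1 f2 : Nat) (l : List Char), l.length ≤ n → l.length ≤ f1 → l.length ≤ f2 →
    PySem.Chars.replace.go sep new f1 l [] = new.intercalate (PySem.Chars.splitOn.go sep f2 l [] []) := by
  have hsl : 1 ≤ sep.length := List.length_pos_iff.mpr hsep
  intro n
  induction n with
  | zero =>
    intro f1 f2 l h1 _ _
    have : l = [] := List.eq_nil_of_length_eq_zero (Nat.le_zero.mp h1)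
    subst this
    cases f1 <;> cases f2 <;> simp [PySem.Chars.replace.go, PySem.Chars.splitOn.go, List.intercalate]
  | succ n ih =>
    intro f1 f2 l h1 h2 h3
    cases l with
    | nil => cases f1 <;> cases f2 <;> simp [PySem.Chars.replace.go, PySem.Chars.splitOn.go, List.intercalate]
    | cons c t =>
      simp only [List.length_cons] at h1 h2 h3
      obtain ⟨f1', rfl⟩ : ∃ k, f1 = k + 1 := ⟨f1 - 1, by omega⟩
      obtain ⟨f2', rfl⟩ : ∃ k, f2 = k + 1 := ⟨f2 - 1, by omega⟩
      simp only [PySem.Chars.replace.go, PySem.Chars.splitOn.go]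
      split
      case isTrue h =>
        rw [repl_go_acc sep new f1' _ (new.reverse ++ []),
            split_go_acc sep f2' _ [] [[].reverse]]
        have hd : (List.drop sep.length (c :: t)).length ≤ n := by
          simp [List.length_drop]; omega
        rw [ih f1' f2' _ hd (by simp [List.length_drop]; omega) (by simp [List.length_drop]; omega)]
        have hne := split_go_ne sep f2' (List.drop sep.length (c :: t))
        cases hg : PySem.Chars.splitOn.go sep f2' (List.drop sep.length (c :: t)) [] [] with
        | nil => exact absurd hg hne
        | cons x xs => simp [intercalate_nil_cons]
      case isFalse h =>
        rw [repl_go_acc sep new f1' t [c], split_go_cur sep f2' t [c]]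
        rw [ih f1' f2' t (by omega) (by omega) (by omega)]
        have hne := split_go_ne sep f2' t
        cases hg : PySem.Chars.splitOn.go sep f2' t [] [] with
        | nil => exact absurd hg hne
        | cons x xs => simp [intercalate_cons_head]

-- replacing sep by sep is the identity
theorem repl_go_id (sep : List Char) : ∀ (f : Nat) (l : List Char),
    PySem.Chars.replace.go sep sep f l [] = l := by
  intro f
  induction f with
  | zero => intro l; simp [PySem.Chars.replace.go]
  | succ f ih =>
    intro l
    cases l with
    | nil => simp [PySem.Chars.replace.go]
    | cons c t =>
      simp only [PySem.Chars.replace.go]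
      split
      case isTrue h =>
        rw [repl_go_acc sep sep f _ (sep.reverse ++ []), ih]
        rw [List.isPrefixOf_iff_prefix] at h
        obtain ⟨u, hu⟩ := h
        simp [← hu]
      case isFalse h => rw [repl_go_acc sep sep f t [c], ih]; simp

-- intercalate as head ++ flatMap over the tail
theorem intercalate_eq_flatMap (new : List Char) : ∀ (xs : List (List Char)) (x : List Char),
    new.intercalate (x :: xs) = x ++ xs.flatMap (fun y => new ++ y) := by
  intro xs
  induction xs with
  | nil => intro x; simp [List.intercalate]
  | cons y ys ih =>
    intro x
    rw [List.flatMap_cons, show new.intercalate (x :: y :: ys) = x ++ new ++ new.intercalate (y :: ys) by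
      simp [List.intercalate, List.intersperse]]
    rw [ih y]
    simp

-- the pieces of splitOn msg, at the fuels the two ports use, with replace on one side
theorem replace_eq_intercalate_split (mc new : List Char) :
    PySem.Chars.replace mc ['\n'] new = new.intercalate (PySem.Chars.splitOn mc ['\n']) := by
  simp only [PySem.Chars.replace, PySem.Chars.splitOn, List.isEmpty_cons, Bool.false_eq_true,
    if_false]
  exact repl_go_eq_intercalate ['\n'] new (by simp) mc.length mc.length (mc.length + 1) mc
    le_rfl le_rfl (by omega)

theorem split_roundtrip (mc : List Char) :
    List.intercalate ['\n'] (PySem.Chars.splitOn mc ['\n']) = mc := by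
  rw [← replace_eq_intercalate_split mc ['\n']]
  simp only [PySem.Chars.replace, List.isEmpty_cons, Bool.false_eq_true, if_false]
  exact repl_go_id ['\n'] mc.length mc

theorem split_ne (mc : List Char) : PySem.Chars.splitOn mc ['\n'] ≠ [] := by
  simp only [PySem.Chars.splitOn]
  exact split_go_ne ['\n'] (mc.length + 1) mc

-- ===== VERDICT (by name: the statement is the Claim_ definition above) =====
theorem format_multiline_message_py_spec : Claim_equal_format_multiline_message_py := by
  intro msg ct fn lv ind _
  unfold Spec_format_multiline_message_py
  unfold format_multiline_message_py format_multiline_message_py_alt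
  simp only []
  rw [replace_eq_intercalate_split]
  cases hl : PySem.Chars.splitOn msg.toList ['\n'] with
  | nil => exact absurd hl (split_ne msg.toList)
  | cons l0 rest =>
    have hrt := split_roundtrip msg.toList
    rw [hl] at hrt
    cases rest with
    | nil =>
      -- single line: the split has one piece, equal to msg itself
      simp only [List.length_cons, List.length_nil]
      rw [if_pos (by omega)]
      simp only [List.intercalate] at hrt ⊢
      simp at hrt ⊢
      simp [hrt]
    | cons l1 rest' =>
      rw [if_neg (by simp)]
      simp only [List.headI, List.tail_cons]
      rw [PySem.List.foldl_append_singleton_eq_map]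
      simp only [PySem.Chars.join]
      rw [intercalate_eq_flatMap, List.singleton_append, intercalate_eq_flatMap]
      simp [List.flatMap_map, List.append_assoc]
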